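-- pv_equiv track=rewrite | github.com/ashish-mj/Object-Code-Generator | SIC.py | call1
-- ===== SOURCE A (Python) =====
-- def binary_convert(num):                                    #binary_conversion
--     s=f'{num:04b}'
--     return s
--
-- def obj_code(op,label,add):
--     count=0
--     num=opcode[op]                                          #opcode(1-8)
--     oc=binary_convert(int(num[0],16))+binary_convert(int(num[1],16))
--     for i in range(len(label)):                             #index_bit(9)
--         if label[i]==',':
--             if label[i+1]=="X":
--                 count=1
--                 break
--     if count==0:
--         oc=oc+'0'
--     else:
--         oc=oc+'1'
--     n=binary_convert(int(add[0],16))                         #address(10-24)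
--     n=n[1:]
--     oc=oc+n
--     oc=oc+binary_convert(int(add[1],16))
--     oc=oc+binary_convert(int(add[2],16))
--     oc=oc+binary_convert(int(add[3],16))                        #binary_format to hexa
--     s1=oc[:4]                                                #if wanted tocaps
--     s1=hex(int(s1,2))
--     s1=s1.upper()
--     s2=oc[4:8]
--     s2=hex(int(s2,2))
--     s2=s2.upper()
--     s3=oc[8:12]
--     s3=hex(int(s3,2))
--     s3=s3.upper()
--     s4=oc[12:16]
--     s4=hex(int(s4,2))
--     s4=s4.upper()
--     s5=oc[16:20]
--     s5=hex(int(s5,2))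
--     s5=s5.upper()
--     s6=oc[20:]
--     s6=hex(int(s6,2))
--     s6=s6.upper()
--     s=s1[2:]+s2[2:]+s3[2:]+s4[2:]+s5[2:]+s6[2:]
--     return s
--
-- opcode={'STL':'14','JSUB':'48','LDA':'00','COMP':'28','STCH':'54','LDCH':'50',\
--         "RSUB":"4C","JEQ":"30","J":"3C","STA":"0C","LDL":"08","LDX":"04","TD":"E0",\
--         "RD":"D8","TIX":"2C","JLT":"38","STX":"10","WD":"DC",}
--
-- def call1(op,label,address):
--     op=op.upper()
--     label=label.upper()
--     address=address.upper()
--     if (op=="BYTE" or op=="WORD") and address=="-":                                #Word or byte instruction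
--       if label[0]=="X":                                       #BYTE X'F1'
--         for i in range(len(label)):
--             if label[i]=="'":
--                 return label[i+1:len(label)-1]
--       elif label=="C'EOF'":                                   #EOF instruction
--           return "454F46"
--       else:                                                   #WORD 3 example
--         label=hex(int(label))
--         return label[2:].upper()
--     elif label=="-" and  address=="-":                          #RSUB - -
--       c=opcode[op]+"0000"
--       return c
--
--     else:
--        try:
--            a=obj_code(op,label,address)
--            return a
--        except KeyError:                                       #RESW or RESB or START
--           return "No Object code  for such instruction"
--        except:
--           return "INVALID INPUT"
-- ===== SOURCE B (Python) =====
-- OPCODE = {'STL': '14', 'JSUB': '48', 'LDA': '00', 'COMP': '28', 'STCH': '54',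
--           'LDCH': '50', 'RSUB': '4C', 'JEQ': '30', 'J': '3C', 'STA': '0C',
--           'LDL': '08', 'LDX': '04', 'TD': 'E0', 'RD': 'D8', 'TIX': '2C',
--           'JLT': '38', 'STX': '10', 'WD': 'DC'}
--
-- HEX = "0123456789ABCDEF"
--
--
-- def call1(op, label, address):
--     op, label, address = op.upper(), label.upper(), address.upper()
--     if op in ("BYTE", "WORD") and address == "-":
--         if label[0] == "X":                       # hex byte literal X'..'
--             q = label.find("'")
--             if q != -1:
--                 return label[q + 1:-1]
--         elif label == "C'EOF'":
--             return "454F46"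
--         else:                                     # numeric word constant
--             return hex(int(label))[2:].upper()
--     elif label == "-" and address == "-":          # no operand (RSUB)
--         return OPCODE[op] + "0000"
--     else:
--         try:
--             o = int(OPCODE[op], 16)
--             x = 0
--             for i, ch in enumerate(label):
--                 if ch == "," and label[i + 1] == "X":
--                     x = 1
--                     break
--             n = [int(address[i], 16) for i in range(4)]
--             q, r = divmod(o, 16)
--             return (HEX[q] + HEX[r] + HEX[8 * x + n[0] % 8]
--                     + HEX[n[1]] + HEX[n[2]] + HEX[n[3]])
--         except KeyError:
--             return "No Object code  for such instruction"
--         except Exception: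
--             return "INVALID INPUT"
-- ===== Notes on version B (the rewrite author's own statement) =====
-- stated objective: simpler
-- what changed: obj_code's per-nibble binary-string build and six-slice hex re-parse are replaced by direct nibble arithmetic (divmod on the opcode byte, a modulo-8 mask for the X bit, one hex-digit table lookup per output character), and the quote search in the BYTE branch uses str.find; Pre_ excludes only inputs where A raises (empty label, non-numeric WORD label, or unknown mnemonic in the literal/no-operand branches) or falls through returning None (an X-literal without a quote) — B behaves identically there (same exceptions, same None).
-- outside the precondition, e.g. on call1('BYTE', 'XAB', '-'): A returns None, B returns None; on call1('BYTE', '', '-'): A raises IndexError, B raises IndexError; on call1('WORD', 'Z9', '-'): A raises ValueError, B raises ValueError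
import Mathlib
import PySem

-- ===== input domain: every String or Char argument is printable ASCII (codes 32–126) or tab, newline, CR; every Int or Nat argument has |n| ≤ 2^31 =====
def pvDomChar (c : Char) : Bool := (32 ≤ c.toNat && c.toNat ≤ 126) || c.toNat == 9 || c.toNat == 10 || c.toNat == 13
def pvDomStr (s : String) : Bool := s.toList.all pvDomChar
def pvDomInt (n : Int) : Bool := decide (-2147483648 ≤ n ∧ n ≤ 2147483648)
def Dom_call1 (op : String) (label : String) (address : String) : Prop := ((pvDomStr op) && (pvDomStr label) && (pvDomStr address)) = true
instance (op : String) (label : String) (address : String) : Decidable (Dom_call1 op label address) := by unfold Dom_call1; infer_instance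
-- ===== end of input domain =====

-- B replaces A's per-nibble binary-string build and six-slice hex reparse by direct nibble
-- arithmetic (divmod plus a hex-digit table), and the quote scan by str.find; same values on Pre_.

-- ===== shared helpers (the module-level dict, and hex() — used by both Pythons) =====

-- opcode table (module-level dict shared by both implementations)
def opcodeDict : PySem.Dict String String := PySem.Dict.ofList
  [("STL","14"),("JSUB","48"),("LDA","00"),("COMP","28"),("STCH","54"),("LDCH","50"),
   ("RSUB","4C"),("JEQ","30"),("J","3C"),("STA","0C"),("LDL","08"),("LDX","04"),("TD","E0"),
   ("RD","D8"),("TIX","2C"),("JLT","38"),("STX","10"),("WD","DC")]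

-- hex(n) as a char list ("0x…" / "-0x…"): lowercase digits via Nat.toDigits 16, exact for every int
def pyHexChars (n : Int) : List Char :=
  if n < 0 then '-' :: '0' :: 'x' :: Nat.toDigits 16 (-n).toNat else '0' :: 'x' :: Nat.toDigits 16 n.toNat

-- ===== PORT A =====

-- f'{num:04b}'  =  format(num,'b').zfill(4)
def binaryConvert (num : Int) : List Char := PySem.Chars.zfill (PySem.Int.toBinChars num) 4

-- result of obj_code under A's try/except: a value, a KeyError, or any other exception
inductive ObjRes
  | ok : List Char → ObjRes
  | keyErr : ObjRes
  | err : ObjRes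
deriving DecidableEq, Repr

-- s_i = hex(int(g,2)); s_i = s_i.upper(); … s_i[2:]   (none = ValueError from int(g,2))
def hexNib (g : List Char) : Option (List Char) :=
  match PySem.Int.ofCharsBase? g 2 with
  | none => none
  | some m => some (PySem.List.slice (PySem.Chars.upper (pyHexChars m)) (some 2) none)

-- the six slices of oc and their hex re-parse, then s = s1[2:]+…+s6[2:]
def objFinish (oc : List Char) : ObjRes :=
  match hexNib (PySem.List.slice oc none (some 4)), hexNib (PySem.List.slice oc (some 4) (some 8)),
        hexNib (PySem.List.slice oc (some 8) (some 12)), hexNib (PySem.List.slice oc (some 12) (some 16)),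
        hexNib (PySem.List.slice oc (some 16) (some 20)), hexNib (PySem.List.slice oc (some 20) none) with
  | some s1, some s2, some s3, some s4, some s5, some s6 => .ok (s1 ++ s2 ++ s3 ++ s4 ++ s5 ++ s6)
  | _, _, _, _, _, _ => .err

-- oc = oc + binary_convert(int(add[3],16)) (IndexError/ValueError = .err), then the hex format
def objAddr3 (oc : List Char) (add : List Char) : ObjRes :=
  match PySem.List.pyGet? add 3 with
  | none => .err
  | some c =>
    match PySem.Int.ofCharsBase? [c] 16 with
    | none => .err
    | some v => objFinish (oc ++ binaryConvert v)

def objAddr2 (oc : List Char) (add : List Char) : ObjRes :=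
  match PySem.List.pyGet? add 2 with
  | none => .err
  | some c =>
    match PySem.Int.ofCharsBase? [c] 16 with
    | none => .err
    | some v => objAddr3 (oc ++ binaryConvert v) add

def objAddr1 (oc : List Char) (add : List Char) : ObjRes :=
  match PySem.List.pyGet? add 1 with
  | none => .err
  | some c =>
    match PySem.Int.ofCharsBase? [c] 16 with
    | none => .err
    | some v => objAddr2 (oc ++ binaryConvert v) add

-- n = binary_convert(int(add[0],16)); n = n[1:]; oc = oc + n
def objAddr0 (oc : List Char) (add : List Char) : ObjRes :=
  match PySem.List.pyGet? add 0 with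
  | none => .err
  | some c =>
    match PySem.Int.ofCharsBase? [c] 16 with
    | none => .err
    | some v => objAddr1 (oc ++ PySem.List.slice (binaryConvert v) (some 1) none) add

-- the index-bit loop: for i in range(len(label)): if label[i]==',': if label[i+1]=='X': count=1; break
-- (none = IndexError when the comma is the last character)
def scanLoop : List Char → Option Nat
  | [] => some 0
  | c :: rest =>
    if c = ',' then
      match rest with
      | [] => none
      | d :: _ => if d = 'X' then some 1 else scanLoop rest
    else scanLoop rest

def objCodeStage2 (oc0 : List Char) (label : List Char) (add : List Char) : ObjRes :=
  match scanLoop label with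
  | none => .err
  | some count => objAddr0 (oc0 ++ (if count = 0 then ['0'] else ['1'])) add

def objCodeNum (num : String) (label : List Char) (add : List Char) : ObjRes :=
  match PySem.List.pyGet? num.toList 0, PySem.List.pyGet? num.toList 1 with
  | some c0, some c1 =>
    match PySem.Int.ofCharsBase? [c0] 16, PySem.Int.ofCharsBase? [c1] 16 with
    | some h0, some h1 => objCodeStage2 (binaryConvert h0 ++ binaryConvert h1) label add
    | _, _ => .err
  | _, _ => .err

def objCode (op : String) (label : List Char) (add : List Char) : ObjRes :=
  match PySem.Dict.get? opcodeDict op with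
  | none => .keyErr
  | some num => objCodeNum num label add

-- the try/except dispatch of call1's else-branch
def resWrap : ObjRes → String
  | .ok s => String.ofList s
  | .keyErr => "No Object code  for such instruction"
  | .err => "INVALID INPUT"

-- for i in range(len(label)): if label[i]=="'": return … (first index of a quote)
def quoteScan : List Char → Option Nat
  | [] => none
  | c :: rest => if c = '\'' then some 0 else (quoteScan rest).map (· + 1)

def call1 (op : String) (label : String) (address : String) : String :=
  let op := PySem.Str.upper op
  let label := PySem.Str.upper label
  let address := PySem.Str.upper address
  if (op = "BYTE" ∨ op = "WORD") ∧ address = "-" then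
    match PySem.Str.pyGet? label 0 with
    | none => ""          -- label[0] raises IndexError (empty label): outside Pre_
    | some c =>
      if c = 'X' then
        match quoteScan label.toList with
        | some i => PySem.Str.slice label (some ((i : Int) + 1)) (some (PySem.Str.len label - 1))
        | none => ""      -- Python falls through and returns None: outside Pre_
      else if label = "C'EOF'" then "454F46"
      else
        match PySem.Int.ofStr? label with
        | none => ""      -- int(label) raises ValueError: outside Pre_
        | some v => PySem.Str.upper (String.ofList (PySem.List.slice (pyHexChars v) (some 2) none))
  else if label = "-" ∧ address = "-" then
    match PySem.Dict.get? opcodeDict op with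
    | some c => c ++ "0000"
    | none => ""          -- opcode[op] raises KeyError: outside Pre_
  else resWrap (objCode op label.toList address.toList)

-- ===== PORT B =====

def hexTable : List Char := ['0','1','2','3','4','5','6','7','8','9','A','B','C','D','E','F']

-- for i, ch in enumerate(label): if ch == ',' and label[i+1] == 'X': x = 1; break
-- (none = IndexError when the comma is the last character)
def bScan : List Char → Option Int
  | [] => some 0
  | c :: rest =>
    if c = ',' then
      match rest with
      | [] => none
      | d :: _ => if d = 'X' then some 1 else bScan rest
    else bScan rest

-- int(address[i], 16)   (none = IndexError or ValueError)
def bNib (a : List Char) (i : Int) : Option Int :=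
  match PySem.List.pyGet? a i with
  | none => none
  | some c => PySem.Int.ofCharsBase? [c] 16

-- n = [int(address[i], 16) for i in range(4)]
def bNibs (a : List Char) : Option (Int × Int × Int × Int) :=
  match bNib a 0, bNib a 1, bNib a 2, bNib a 3 with
  | some n0, some n1, some n2, some n3 => some (n0, n1, n2, n3)
  | _, _, _, _ => none

def call1_alt (op : String) (label : String) (address : String) : String :=
  let op := PySem.Str.upper op
  let label := PySem.Str.upper label
  let address := PySem.Str.upper address
  if (op = "BYTE" ∨ op = "WORD") ∧ address = "-" then
    match PySem.Str.pyGet? label 0 with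
    | none => ""          -- label[0] raises IndexError (empty label): outside Pre_
    | some c =>
      if c = 'X' then
        let q := PySem.Str.find label "'"
        if q ≠ -1 then PySem.Str.slice label (some (q + 1)) (some (-1))
        else ""           -- Python falls through and returns None: outside Pre_
      else if label = "C'EOF'" then "454F46"
      else
        match PySem.Int.ofStr? label with
        | none => ""      -- int(label) raises ValueError: outside Pre_
        | some v => PySem.Str.upper (String.ofList (PySem.List.slice (pyHexChars v) (some 2) none))
  else if label = "-" ∧ address = "-" then
    match PySem.Dict.get? opcodeDict op with
    | some c => c ++ "0000"
    | none => ""          -- OPCODE[op] raises KeyError: outside Pre_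
  else
    match PySem.Dict.get? opcodeDict op with
    | none => "No Object code  for such instruction"    -- KeyError
    | some num =>
      match PySem.Int.ofStrBase? num 16 with
      | none => "INVALID INPUT"
      | some o =>
        match bScan label.toList with
        | none => "INVALID INPUT"
        | some x =>
          match bNibs address.toList with
          | none => "INVALID INPUT"
          | some (n0, n1, n2, n3) =>
            match PySem.Int.divmod? o 16 with
            | none => "INVALID INPUT"
            | some (q, r) =>
              match PySem.List.pyGet? hexTable q, PySem.List.pyGet? hexTable r,
                    PySem.List.pyGet? hexTable (8 * x + PySem.Int.mod n0 8),
                    PySem.List.pyGet? hexTable n1, PySem.List.pyGet? hexTable n2,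
                    PySem.List.pyGet? hexTable n3 with
              | some c1, some c2, some c3, some c4, some c5, some c6 =>
                String.ofList [c1, c2, c3, c4, c5, c6]
              | _, _, _, _, _, _ => "INVALID INPUT"

-- ===== PRECONDITION & SPEC =====

-- Pre_ excludes exactly the inputs where A raises (IndexError on label[0] of an empty label,
-- int() ValueError or opcode[] KeyError in the BYTE/WORD and '- -' branches) or where A falls
-- off the end and returns None instead of a string (an X-literal label without a quote);
-- B raises the same exceptions / returns None on exactly these inputs.
def Pre_call1 (op : String) (label : String) (address : String) : Prop :=
  (((PySem.Str.upper op = "BYTE" ∨ PySem.Str.upper op = "WORD") ∧ PySem.Str.upper address = "-") →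
    (PySem.Str.upper label ≠ "" ∧
     (PySem.Str.pyGet? (PySem.Str.upper label) 0 = some 'X' →
        PySem.Str.find (PySem.Str.upper label) "'" ≠ -1) ∧
     (PySem.Str.pyGet? (PySem.Str.upper label) 0 ≠ some 'X' →
        PySem.Str.upper label ≠ "C'EOF'" →
        (PySem.Int.ofStr? (PySem.Str.upper label)).isSome = true))) ∧
  (¬((PySem.Str.upper op = "BYTE" ∨ PySem.Str.upper op = "WORD") ∧ PySem.Str.upper address = "-") →
    (PySem.Str.upper label = "-" ∧ PySem.Str.upper address = "-") →
    (PySem.Dict.get? opcodeDict (PySem.Str.upper op)).isSome = true)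

instance (op : String) (label : String) (address : String) : Decidable (Pre_call1 op label address) := by
  unfold Pre_call1; infer_instance

def pvWitness_call1 : String × String × String := ("LDA", "BUFFER,X", "8039")

def Spec_call1 (op : String) (label : String) (address : String) (out : String) : Prop := out = call1_alt op label address
instance (op : String) (label : String) (address : String) (out : String) : Decidable (Spec_call1 op label address out) := by unfold Spec_call1; infer_instance

-- ===== CLAIM (what is proved, stated in full; the proofs are below) =====
def Claim_equal_call1 : Prop := ∀ (op : String) (label : String) (address : String), Dom_call1 op label address → Pre_call1 op label address → Spec_call1 op label address (call1 op label address)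


-- ===== LEMMAS AND PROOFS =====

-- ---- generic helpers ----

lemma list_len4 (l : List Char) (h : l.length = 4) : ∃ a b c d, l = [a, b, c, d] := by
  match l, h with
  | [a, b, c, d], _ => exact ⟨a, b, c, d, rfl⟩

-- ---- character bounds from the input domain ----

lemma upperChar_lt_aux : ∀ n : Nat, n < 127 → (PySem.Chars.upperChar (Char.ofNat n)).toNat < 127 := by decide

lemma dom_upper_chars (s : String) (h : pvDomStr s = true) :
    ∀ c ∈ (PySem.Str.upper s).toList, c.toNat < 127 := by
  intro c hc
  rw [PySem.Str.toList_upper] at hc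
  unfold PySem.Chars.upper at hc
  obtain ⟨c', hc', rfl⟩ := List.mem_map.mp hc
  have hd : pvDomChar c' = true := by
    unfold pvDomStr at h
    exact List.all_eq_true.mp h c' hc'
  have hlt : c'.toNat < 127 := by
    unfold pvDomChar at hd
    simp only [Bool.or_eq_true, Bool.and_eq_true, decide_eq_true_eq, beq_iff_eq] at hd
    omega
  have := upperChar_lt_aux c'.toNat hlt
  rwa [Char.ofNat_toNat] at this

-- int(c,16) on a single ASCII char gives a value in [0,16)
def nibOkB (c : Char) : Bool :=
  match PySem.Int.ofCharsBase? [c] 16 with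
  | none => true
  | some v => decide (0 ≤ v ∧ v < 16)

lemma nibOkB_all : ∀ n : Nat, n < 127 → nibOkB (Char.ofNat n) = true := by decide

lemma charNibBound (c : Char) (h : c.toNat < 127) {v : Int}
    (hv : PySem.Int.ofCharsBase? [c] 16 = some v) : 0 ≤ v ∧ v < 16 := by
  have h2 := nibOkB_all c.toNat h
  rw [Char.ofNat_toNat] at h2
  unfold nibOkB at h2
  rw [hv] at h2
  simpa using h2

-- ---- the opcode table ----

def numOKB (num : String) : Bool :=
  match PySem.List.pyGet? num.toList 0, PySem.List.pyGet? num.toList 1,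
        PySem.Int.ofStrBase? num 16 with
  | some c0, some c1, some o =>
    match PySem.Int.ofCharsBase? [c0] 16, PySem.Int.ofCharsBase? [c1] 16 with
    | some h0, some h1 => decide (0 ≤ h0 ∧ h0 < 16 ∧ 0 ≤ h1 ∧ h1 < 16 ∧ o = 16 * h0 + h1)
    | _, _ => false
  | _, _, _ => false

lemma numOKB_all : ∀ p ∈ opcodeDict.items, numOKB p.2 = true := by decide

lemma numOKB_of_get? (k num : String) (h : PySem.Dict.get? opcodeDict k = some num) :
    numOKB num = true :=
  numOKB_all (k, num) (PySem.Dict.mem_items_of_get?_eq_some opcodeDict h)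

-- ---- nibble formatting facts (finite checks) ----

lemma bc_len (v : Int) (h0 : 0 ≤ v) (h1 : v < 16) : (binaryConvert v).length = 4 := by
  interval_cases v <;> decide

lemma hexNib_bc (v : Int) (h0 : 0 ≤ v) (h1 : v < 16) :
    hexNib (binaryConvert v) = some [PySem.List.pyGetD hexTable v ' '] := by
  interval_cases v <;> decide

lemma hexNib_g3 (x v : Int) (hx : x = 0 ∨ x = 1) (h0 : 0 ≤ v) (h1 : v < 16) :
    hexNib ((if x = 0 then ['0'] else ['1']) ++ PySem.List.slice (binaryConvert v) (some 1) none)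
      = some [PySem.List.pyGetD hexTable (8 * x + PySem.Int.mod v 8) ' '] := by
  rcases hx with rfl | rfl <;> interval_cases v <;> decide

lemma pyGet?_hexTable (v : Int) (h0 : 0 ≤ v) (h1 : v < 16) :
    PySem.List.pyGet? hexTable v = some (PySem.List.pyGetD hexTable v ' ') := by
  interval_cases v <;> decide

lemma div16 (h0 h1 : Int) (a : 0 ≤ h1) (b : h1 < 16) :
    PySem.Int.floordiv (16 * h0 + h1) 16 = h0 ∧ PySem.Int.mod (16 * h0 + h1) 16 = h1 := by
  have hd : PySem.Int.floordiv (16 * h0 + h1) 16 = h0 := by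
    rw [PySem.Int.floordiv_eq_iff_of_pos (by norm_num)]; omega
  refine ⟨hd, ?_⟩
  have := PySem.Int.floordiv_mul_add_mod (16 * h0 + h1) 16
  omega

lemma divmod16 (o : Int) : PySem.Int.divmod? o 16 =
    some (PySem.Int.floordiv o 16, PySem.Int.mod o 16) := by
  norm_num [PySem.Int.divmod?, PySem.Int.floordiv, PySem.Int.mod]

-- ---- the two comma-scan loops agree ----

lemma bScan_eq_scanLoop : ∀ cs : List Char, bScan cs = (scanLoop cs).map (fun n => (n : Int)) := by
  intro cs
  induction cs using scanLoop.induct with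
  | case1 => rfl
  | case2 => rfl
  | case3 tail => rfl
  | case4 d tail hd ih => rw [bScan.eq_def, scanLoop.eq_def]; simp [hd]; simpa using ih
  | case5 d tail hd ih => rw [bScan.eq_def, scanLoop.eq_def]; simp [hd]; simpa using ih

lemma scanLoop_val (cs : List Char) : ∀ n, scanLoop cs = some n → n = 0 ∨ n = 1 := by
  induction cs using scanLoop.induct with
  | case1 => intro n h; simp [scanLoop] at h; omega
  | case2 => intro n h; simp [scanLoop] at h
  | case3 tail => intro n h; simp [scanLoop] at h; omega
  | case4 d tail hd ih => intro n h; rw [scanLoop.eq_def] at h; simp [hd] at h; exact ih n h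
  | case5 d tail hd ih => intro n h; rw [scanLoop.eq_def] at h; simp [hd] at h; exact ih n h

-- ---- the binary round trip equals the direct nibble formatting ----

set_option maxHeartbeats 4000000 in
lemma objFinish_groups (x1 x2 x3 x4 y1 y2 y3 y4 z1 w1 w2 w3 e1 e2 e3 e4 f1 f2 f3 f4 t1 t2 t3 t4 : Char) :
    objFinish ((((((([x1,x2,x3,x4] ++ [y1,y2,y3,y4]) ++ [z1]) ++ [w1,w2,w3]) ++ [e1,e2,e3,e4]) ++ [f1,f2,f3,f4]) ++ [t1,t2,t3,t4])) =
    (match hexNib [x1,x2,x3,x4], hexNib [y1,y2,y3,y4], hexNib [z1,w1,w2,w3], hexNib [e1,e2,e3,e4], hexNib [f1,f2,f3,f4], hexNib [t1,t2,t3,t4] with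
     | some s1, some s2, some s3, some s4, some s5, some s6 => ObjRes.ok (s1 ++ s2 ++ s3 ++ s4 ++ s5 ++ s6)
     | _, _, _, _, _, _ => ObjRes.err) := rfl

-- ---- quote scan vs find ----

lemma single_prefix_drop (l : List Char) (i : Nat) (c : Char) :
    [c] <+: l.drop i ↔ l[i]? = some c := by
  rw [← List.head?_drop]
  constructor
  · rintro ⟨t, ht⟩; rw [← ht]; rfl
  · intro h
    cases hd : l.drop i with
    | nil => rw [hd] at h; simp at h
    | cons a t =>
      rw [hd] at h
      simp only [List.head?_cons, Option.some.injEq] at h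
      subst h; exact ⟨t, rfl⟩

lemma quoteScan_none : ∀ l : List Char, quoteScan l = none ↔ '\'' ∉ l := by
  intro l
  induction l with
  | nil => simp [quoteScan]
  | cons c rest ih =>
    unfold quoteScan
    by_cases hc : c = '\''
    · simp [hc]
    · simp [hc, Option.map_eq_none_iff, ih, Ne.symm hc]

lemma quoteScan_some : ∀ (l : List Char) (j : Nat), quoteScan l = some j →
    l[j]? = some '\'' ∧ ∀ i < j, l[i]? ≠ some '\''
  | [], j, h => by simp [quoteScan] at h
  | c :: rest, j, h => by
    unfold quoteScan at h
    by_cases hc : c = '\''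
    · rw [if_pos hc] at h
      cases h
      exact ⟨by simp [hc], by omega⟩
    · rw [if_neg hc] at h
      obtain ⟨m, hm, rfl⟩ := Option.map_eq_some_iff.mp h
      obtain ⟨h1, h2⟩ := quoteScan_some rest m hm
      refine ⟨by simpa using h1, ?_⟩
      intro i hi
      cases i with
      | zero => simpa using hc
      | succ i' => simpa using h2 i' (by omega)

lemma find_of_first (cs : List Char) (j : Nat)
    (h1 : cs[j]? = some '\'') (h2 : ∀ i < j, cs[i]? ≠ some '\'') :
    PySem.Chars.find cs ['\''] = (j : Int) := by
  have hpre : ['\''] <+: cs.drop j := (single_prefix_drop cs j '\'').mpr h1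
  have hinf : ['\''] <:+: cs := by
    obtain ⟨u, hu⟩ := hpre
    exact ⟨cs.take j, u, by rw [List.append_assoc, hu, List.take_append_drop]⟩
  have hf0 : 0 ≤ PySem.Chars.find cs ['\''] := (PySem.Chars.find_nonneg_iff cs _).mpr hinf
  obtain ⟨hfp, hfmin⟩ := PySem.Chars.find_spec hf0
  set k := (PySem.Chars.find cs ['\'']).toNat with hk
  have hck : cs[k]? = some '\'' := (single_prefix_drop cs k '\'').mp hfp
  have hjk : j = k := by
    rcases Nat.lt_trichotomy j k with h | h | h
    · exact absurd ((single_prefix_drop cs j '\'').mpr h1) (hfmin j h)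
    · exact h
    · exact absurd hck (h2 k h)
  omega

lemma find_of_none (cs : List Char) (h : '\'' ∉ cs) :
    PySem.Chars.find cs ['\''] = -1 := by
  rw [PySem.Chars.find_eq_neg_one_iff]
  intro hinf
  exact h (List.singleton_sublist.mp hinf.sublist)

-- xs[a:len(xs)-1] = xs[a:-1] on a nonempty list
lemma slice_end_eq (xs : List Char) (a : Int) (h : xs ≠ []) :
    PySem.List.slice xs (some a) (some ((xs.length : Int) - 1)) =
      PySem.List.slice xs (some a) (some (-1)) := by
  have hn : 1 ≤ xs.length := List.length_pos_iff.mpr h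
  have hcl : PySem.List.clampIdx xs.length ((xs.length : Int) - 1) =
      PySem.List.clampIdx xs.length (-1) := by
    unfold PySem.List.clampIdx
    split_ifs <;> omega
  simp [PySem.List.slice, hcl]

lemma objFinish_whole (h0 h1 x n0 n1 n2 n3 : Int)
    (b0 : 0 ≤ h0 ∧ h0 < 16) (b1 : 0 ≤ h1 ∧ h1 < 16) (hx : x = 0 ∨ x = 1)
    (d0 : 0 ≤ n0 ∧ n0 < 16) (d1 : 0 ≤ n1 ∧ n1 < 16) (d2 : 0 ≤ n2 ∧ n2 < 16) (d3 : 0 ≤ n3 ∧ n3 < 16) :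
    objFinish ((((((binaryConvert h0 ++ binaryConvert h1) ++ (if x = 0 then ['0'] else ['1'])) ++
        PySem.List.slice (binaryConvert n0) (some 1) none) ++ binaryConvert n1) ++ binaryConvert n2) ++ binaryConvert n3)
      = ObjRes.ok [PySem.List.pyGetD hexTable h0 ' ', PySem.List.pyGetD hexTable h1 ' ',
          PySem.List.pyGetD hexTable (8 * x + PySem.Int.mod n0 8) ' ',
          PySem.List.pyGetD hexTable n1 ' ', PySem.List.pyGetD hexTable n2 ' ',
          PySem.List.pyGetD hexTable n3 ' '] := by
  obtain ⟨x1, x2, x3, x4, hb0⟩ := list_len4 _ (bc_len h0 b0.1 b0.2)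
  obtain ⟨y1, y2, y3, y4, hb1⟩ := list_len4 _ (bc_len h1 b1.1 b1.2)
  obtain ⟨p1, p2, p3, p4, hbn⟩ := list_len4 _ (bc_len n0 d0.1 d0.2)
  obtain ⟨e1, e2, e3, e4, hb2⟩ := list_len4 _ (bc_len n1 d1.1 d1.2)
  obtain ⟨f1, f2, f3, f4, hb3⟩ := list_len4 _ (bc_len n2 d2.1 d2.2)
  obtain ⟨t1, t2, t3, t4, hb4⟩ := list_len4 _ (bc_len n3 d3.1 d3.2)
  have hbit : (if x = 0 then ['0'] else ['1']) = [if x = 0 then '0' else '1'] := by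
    rcases hx with rfl | rfl <;> simp
  have hsl : PySem.List.slice (binaryConvert n0) (some 1) none = [p2, p3, p4] := by
    rw [PySem.List.slice_from_one, hbn]; rfl
  have hg3 : ([(if x = 0 then '0' else '1'), p2, p3, p4] : List Char) =
      (if x = 0 then ['0'] else ['1']) ++ PySem.List.slice (binaryConvert n0) (some 1) none := by
    rw [hbit, hsl]; rfl
  rw [hb0, hb1, hbit, hsl, hb2, hb3, hb4, objFinish_groups, ← hb0, ← hb1, ← hb2, ← hb3, ← hb4,
      hg3, hexNib_bc h0 b0.1 b0.2, hexNib_bc h1 b1.1 b1.2, hexNib_g3 x n0 hx d0.1 d0.2,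
      hexNib_bc n1 d1.1 d1.2, hexNib_bc n2 d2.1 d2.2, hexNib_bc n3 d3.1 d3.2]
  simp

-- ---- the else branch ----

lemma else_eq (u l a : String) (hch : ∀ c ∈ a.toList, c.toNat < 127) :
    resWrap (objCode u l.toList a.toList) =
      (match PySem.Dict.get? opcodeDict u with
       | none => "No Object code  for such instruction"
       | some num =>
         match PySem.Int.ofStrBase? num 16 with
         | none => "INVALID INPUT"
         | some o =>
           match bScan l.toList with
           | none => "INVALID INPUT"
           | some x =>
             match bNibs a.toList with
             | none => "INVALID INPUT"
             | some (n0, n1, n2, n3) =>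
               match PySem.Int.divmod? o 16 with
               | none => "INVALID INPUT"
               | some (q, r) =>
                 match PySem.List.pyGet? hexTable q, PySem.List.pyGet? hexTable r,
                       PySem.List.pyGet? hexTable (8 * x + PySem.Int.mod n0 8),
                       PySem.List.pyGet? hexTable n1, PySem.List.pyGet? hexTable n2,
                       PySem.List.pyGet? hexTable n3 with
                 | some c1, some c2, some c3, some c4, some c5, some c6 =>
                   String.ofList [c1, c2, c3, c4, c5, c6]
                 | _, _, _, _, _, _ => "INVALID INPUT") := by
  unfold objCode
  cases hd : PySem.Dict.get? opcodeDict u with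
  | none => rfl
  | some num =>
  simp only []
  have hOK := numOKB_of_get? u num hd
  unfold numOKB at hOK
  split at hOK
  case _ c0 c1 o hc0 hc1 ho =>
    split at hOK
    case _ h0 h1 hh0 hh1 =>
      simp only [decide_eq_true_eq] at hOK
      obtain ⟨hb0, hb0', hb1, hb1', hoeq⟩ := hOK
      unfold objCodeNum
      rw [hc0, hc1]
      simp only []
      rw [hh0, hh1]
      simp only []
      rw [ho]
      simp only []
      unfold objCodeStage2
      cases hs : scanLoop l.toList with
      | none =>
        have hbs : bScan l.toList = none := by rw [bScan_eq_scanLoop, hs]; rfl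
        rw [hbs]
        rfl
      | some cnt =>
      have hbs : bScan l.toList = some ((cnt : Int)) := by rw [bScan_eq_scanLoop, hs]; rfl
      rw [hbs]
      simp only []
      unfold objAddr0 bNibs bNib
      cases hg0 : PySem.List.pyGet? a.toList 0 with
      | none => rfl
      | some ch0 =>
      simp only []
      have hm0 : ch0 ∈ a.toList := by
        simp only [pysem] at hg0
        exact List.mem_of_getElem? hg0
      cases hv0 : PySem.Int.ofCharsBase? [ch0] 16 with
      | none => rfl
      | some n0 =>
      simp only []
      have hn0 := charNibBound ch0 (hch ch0 hm0) hv0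
      unfold objAddr1
      cases hg1 : PySem.List.pyGet? a.toList 1 with
      | none => rfl
      | some ch1 =>
      simp only []
      have hm1 : ch1 ∈ a.toList := by
        simp only [pysem] at hg1
        exact List.mem_of_getElem? hg1
      cases hv1 : PySem.Int.ofCharsBase? [ch1] 16 with
      | none => rfl
      | some n1 =>
      simp only []
      have hn1 := charNibBound ch1 (hch ch1 hm1) hv1
      unfold objAddr2
      cases hg2 : PySem.List.pyGet? a.toList 2 with
      | none => rfl
      | some ch2 =>
      simp only []
      have hm2 : ch2 ∈ a.toList := by
        simp only [pysem] at hg2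
        exact List.mem_of_getElem? hg2
      cases hv2 : PySem.Int.ofCharsBase? [ch2] 16 with
      | none => rfl
      | some n2 =>
      simp only []
      have hn2 := charNibBound ch2 (hch ch2 hm2) hv2
      unfold objAddr3
      cases hg3 : PySem.List.pyGet? a.toList 3 with
      | none => rfl
      | some ch3 =>
      simp only []
      have hm3 : ch3 ∈ a.toList := by
        simp only [pysem] at hg3
        exact List.mem_of_getElem? hg3
      cases hv3 : PySem.Int.ofCharsBase? [ch3] 16 with
      | none => rfl
      | some n3 =>
      simp only []
      have hn3 := charNibBound ch3 (hch ch3 hm3) hv3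
      have hcnt := scanLoop_val l.toList cnt hs
      have hx : ((cnt : Int)) = 0 ∨ ((cnt : Int)) = 1 := by omega
      have hiff : ((cnt = 0) ↔ ((cnt : Int) = 0)) := by omega
      have hbit : (if cnt = 0 then (['0'] : List Char) else ['1']) =
          (if (cnt : Int) = 0 then ['0'] else ['1']) := by
        rcases hcnt with rfl | rfl <;> simp
      rw [hbit]
      rw [objFinish_whole h0 h1 (cnt : Int) n0 n1 n2 n3 ⟨hb0, hb0'⟩ ⟨hb1, hb1'⟩ hx hn0 hn1 hn2 hn3]
      subst hoeq
      rw [divmod16, (div16 h0 h1 hb1 hb1').1, (div16 h0 h1 hb1 hb1').2]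
      simp only []
      have hxb : 0 ≤ 8 * (cnt : Int) + PySem.Int.mod n0 8 ∧ 8 * (cnt : Int) + PySem.Int.mod n0 8 < 16 := by
        have h1' := PySem.Int.mod_nonneg n0 (by norm_num : (0:Int) < 8)
        have h2' := PySem.Int.mod_lt n0 (by norm_num : (0:Int) < 8)
        omega
      rw [pyGet?_hexTable h0 hb0 hb0', pyGet?_hexTable h1 hb1 hb1',
          pyGet?_hexTable _ hxb.1 hxb.2, pyGet?_hexTable n1 hn1.1 hn1.2,
          pyGet?_hexTable n2 hn2.1 hn2.2, pyGet?_hexTable n3 hn3.1 hn3.2]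
      rfl
    all_goals simp at hOK
  all_goals simp at hOK

-- ===== VERDICT (by name: the statement is the Claim_ definition above) =====
theorem call1_spec : Claim_equal_call1 := by
  intro op label address hdom hpre
  unfold Spec_call1 call1 call1_alt
  have hdm : pvDomStr address = true := by
    unfold Dom_call1 at hdom
    simp only [Bool.and_eq_true] at hdom
    exact hdom.2
  have hch := dom_upper_chars address hdm
  unfold Pre_call1 at hpre
  set U := PySem.Str.upper op with hU
  set L := PySem.Str.upper label with hL
  set AD := PySem.Str.upper address with hAD
  by_cases hbw : (U = "BYTE" ∨ U = "WORD") ∧ AD = "-"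
  · rw [if_pos hbw, if_pos hbw]
    obtain ⟨hCond, _⟩ := hpre
    obtain ⟨hne, hXq, hInt⟩ := hCond hbw
    cases hz : PySem.Str.pyGet? L 0 with
    | none => rfl
    | some c =>
    simp only []
    by_cases hX : c = 'X'
    · rw [if_pos hX, if_pos hX]
      cases hq : quoteScan L.toList with
      | none =>
        have hnm : '\'' ∉ L.toList := (quoteScan_none _).mp hq
        have hf : PySem.Str.find L "'" = -1 := by
          rw [PySem.Str.find_eq]
          exact find_of_none _ hnm
        rw [hf]
        simp
      | some j =>
        obtain ⟨h1, h2⟩ := quoteScan_some L.toList j hq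
        have hf : PySem.Str.find L "'" = (j : Int) := by
          rw [PySem.Str.find_eq]
          exact find_of_first _ j h1 h2
        rw [hf]
        have hjne : ¬((j : Int) = -1) := by omega
        rw [if_pos hjne]
        refine String.toList_inj.mp ?_
        rw [PySem.Str.toList_slice, PySem.Str.toList_slice,
            PySem.Chars.slice_eq_listSlice, PySem.Chars.slice_eq_listSlice,
            PySem.Str.len_eq]
        exact slice_end_eq L.toList ((j : Int) + 1)
          (by intro hLnil; rw [hLnil] at h1; simp at h1)
    · rw [if_neg hX, if_neg hX]
  · rw [if_neg hbw, if_neg hbw]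
    by_cases hdd : L = "-" ∧ AD = "-"
    · rw [if_pos hdd, if_pos hdd]
    · rw [if_neg hdd, if_neg hdd]
      exact else_eq U L AD hch
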